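-- pv_equiv track=rewrite | github.com/TheGigaChat/Python-challenges | EX/ex08_recursion/recursion.py | x_sum_recursion
-- ===== SOURCE A (Python) =====
-- def x_sum_recursion(nums: list, x: int, multiplier=1) -> int:
--     """
--     Given list 'nums' and a number called 'x' recursively return sum of every x'th number in 'nums'.
--
--     In this task "indexing" starts from 1, so if 'x' = 2 and 'nums' = [2, 3, 4, -9], the output should be -6 (3 + -9).
--     'X' can also be negative, in that case indexing starts from the end of 'nums', see examples below.
--     If 'x' is 0, the sum should be 0 as well.
--
--     Solution must be recursive!
--
--     :param nums: list of integers
--     :param x: number indicating every which num to add to sum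
--     :param multiplier: number to help iterate through every x value
--     :return: sum of every x'th number in the list
--     """
--     if x == 0:
--         return 0
--     if x > 0:
--         index = multiplier * x - 1
--         if index < len(nums):
--             return nums[index] + x_sum_recursion(nums, x, multiplier + 1)
--         else:
--             return 0
--     else:
--         index = multiplier * x
--         if abs(index) <= len(nums):
--             return nums[index] + x_sum_recursion(nums, x, multiplier + 1)
--         else:
--             return 0
-- ===== SOURCE B (Python) =====
-- def x_sum_recursion(nums: list, x: int, multiplier=1) -> int:
--     # Non-recursive: build the index progression with range() and sum it in one pass.
--     if x == 0:
--         return 0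
--     n = len(nums)
--     if x > 0:
--         return sum(nums[i] for i in range(multiplier * x - 1, n, x))
--     start = multiplier * x
--     if start > n:
--         # first index is already past the end of the list
--         return 0
--     return sum(nums[i] for i in range(start, -n - 1, x))
-- ===== Notes on version B (the rewrite author's own statement) =====
-- stated objective: simpler
-- what changed: Replaced the multiplier-incrementing recursion by a closed-form index progression (range with step x, negative indices included) summed in a single pass.
import Mathlib
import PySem

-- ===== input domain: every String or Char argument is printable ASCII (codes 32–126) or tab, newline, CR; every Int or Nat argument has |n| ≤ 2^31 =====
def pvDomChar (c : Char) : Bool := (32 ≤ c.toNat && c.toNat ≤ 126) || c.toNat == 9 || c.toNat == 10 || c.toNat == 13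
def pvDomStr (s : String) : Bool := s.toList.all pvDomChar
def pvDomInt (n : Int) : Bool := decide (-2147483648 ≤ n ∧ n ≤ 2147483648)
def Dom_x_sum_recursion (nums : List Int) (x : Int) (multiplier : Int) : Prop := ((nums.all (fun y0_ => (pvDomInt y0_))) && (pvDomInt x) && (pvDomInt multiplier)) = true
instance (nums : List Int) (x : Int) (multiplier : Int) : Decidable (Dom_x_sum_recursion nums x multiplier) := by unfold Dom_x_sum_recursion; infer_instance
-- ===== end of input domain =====

-- B replaces A's multiplier-incrementing recursion by the closed-form index progression
-- (a range with step x, negative indices indexing from the end) summed in one pass; same values.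

-- ===== PORT A =====
-- Literal port of A's recursion; nums[index] is pyGet? (none exactly where Python raises
-- IndexError; those inputs are excluded by Pre_ below, so the .getD 0 is never the value used).
def x_sum_recursion (nums : List Int) (x : Int) (multiplier : Int) : Int :=
  if x = 0 then 0
  else if 0 < x then
    let index := multiplier * x - 1
    if index < (nums.length : Int) then
      (PySem.List.pyGet? nums index).getD 0 + x_sum_recursion nums x (multiplier + 1)
    else 0
  else
    let index := multiplier * x
    if (index.natAbs : Int) ≤ (nums.length : Int) then
      (PySem.List.pyGet? nums index).getD 0 + x_sum_recursion nums x (multiplier + 1)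
    else 0
termination_by ((nums.length : Int) + 1 - (if 0 < x then multiplier * x else -(multiplier * x))).toNat
decreasing_by
  · have h : (multiplier + 1) * x = multiplier * x + x := by ring
    simp only [if_pos (by assumption : (0:Int) < x)]
    omega
  · have h : (multiplier + 1) * x = multiplier * x + x := by ring
    have hx : ¬ (0:Int) < x := by assumption
    simp only [if_neg hx]
    omega

-- ===== PORT B =====
-- Port of Source B: sum(nums[i] for i in range(...)) is pyRange mapped through pyGet? and summed.
def x_sum_recursion_alt (nums : List Int) (x : Int) (multiplier : Int) : Int :=
  if x = 0 then 0
  else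
    let n : Int := (nums.length : Int)
    if 0 < x then
      ((PySem.List.pyRange (multiplier * x - 1) n x).map
        (fun i => (PySem.List.pyGet? nums i).getD 0)).sum
    else
      let start := multiplier * x
      if start > n then 0
      else
        ((PySem.List.pyRange start (-n - 1) x).map
          (fun i => (PySem.List.pyGet? nums i).getD 0)).sum

-- ===== PRECONDITION & SPEC =====
-- Pre_ excludes exactly the inputs where the Python A raises IndexError (B raises there too):
-- for x > 0 a first index below -len(nums), for x < 0 a first index equal to len(nums).
def Pre_x_sum_recursion (nums : List Int) (x : Int) (multiplier : Int) : Prop :=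
  (0 < x → multiplier * x - 1 ≥ -(nums.length : Int)) ∧
  (x < 0 → multiplier * x ≠ (nums.length : Int))
instance (nums : List Int) (x : Int) (multiplier : Int) : Decidable (Pre_x_sum_recursion nums x multiplier) := by unfold Pre_x_sum_recursion; infer_instance

def pvWitness_x_sum_recursion : List Int × Int × Int := ([2, 3, 4, -9], 2, 1)

def Spec_x_sum_recursion (nums : List Int) (x : Int) (multiplier : Int) (out : Int) : Prop := out = x_sum_recursion_alt nums x multiplier
instance (nums : List Int) (x : Int) (multiplier : Int) (out : Int) : Decidable (Spec_x_sum_recursion nums x multiplier out) := by unfold Spec_x_sum_recursion; infer_instance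

-- ===== CLAIM (what is proved, stated in full; the proofs are below) =====
def Claim_equal_x_sum_recursion : Prop := ∀ (nums : List Int) (x : Int) (multiplier : Int), Dom_x_sum_recursion nums x multiplier → Pre_x_sum_recursion nums x multiplier → Spec_x_sum_recursion nums x multiplier (x_sum_recursion nums x multiplier)

-- ===== LEMMAS AND PROOFS =====

-- Stepping lemmas for pyRange with a general nonunit step (the library closed forms
-- pyRange_of_pos / the definition are unfolded once here, then used by induction below).
theorem pyRange_pos_nil (a b s : Int) (hs : 0 < s) (h : b ≤ a) :
    PySem.List.pyRange a b s = [] := by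
  rw [PySem.List.pyRange_of_pos a b hs]
  simp [not_lt.mpr h]

theorem pyRange_pos_cons (a b s : Int) (hs : 0 < s) (h : a < b) :
    PySem.List.pyRange a b s = a :: PySem.List.pyRange (a + s) b s := by
  rw [PySem.List.pyRange_of_pos a b hs, PySem.List.pyRange_of_pos (a + s) b hs]
  by_cases h2 : a + s < b
  · have hstep : (b - a + s - 1) / s = (b - (a + s) + s - 1) / s + 1 := by
      have := Int.add_mul_ediv_right (b - (a + s) + s - 1) 1 hs.ne'
      have harg : b - (a + s) + s - 1 + 1 * s = b - a + s - 1 := by ring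
      rw [harg] at this
      omega
    have hnn : 0 ≤ (b - (a + s) + s - 1) / s := by
      apply Int.ediv_nonneg _ hs.le
      omega
    simp only [if_pos h, if_pos h2]
    have hT : ((b - a + s - 1) / s).toNat = ((b - (a + s) + s - 1) / s).toNat + 1 := by omega
    rw [hT, List.range_succ_eq_map, List.map_cons, List.map_map]
    congr 1
    · push_cast; ring
    · apply List.map_congr_left
      intro k _
      simp only [Function.comp_apply]
      push_cast [Nat.succ_eq_add_one]
      ring
  · -- exactly one element left
    have h1 : 1 ≤ (b - a + s - 1) / s := by
      rw [Int.le_ediv_iff_mul_le hs]; omega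
    have h2' : (b - a + s - 1) / s < 2 := by
      rw [Int.ediv_lt_iff_lt_mul hs]; omega
    have hone : (b - a + s - 1) / s = 1 := by omega
    simp only [if_pos h, if_neg h2, hone]
    norm_num

theorem pyRange_neg_nil (a b s : Int) (hs : s < 0) (h : a ≤ b) :
    PySem.List.pyRange a b s = [] := by
  simp [PySem.List.pyRange, hs.ne, not_lt.mpr h, not_lt.mpr hs.le]

theorem pyRange_neg_cons (a b s : Int) (hs : s < 0) (h : b < a) :
    PySem.List.pyRange a b s = a :: PySem.List.pyRange (a + s) b s := by
  simp only [PySem.List.pyRange, if_neg hs.ne, if_neg (not_lt.mpr hs.le)]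
  by_cases h2 : b < a + s
  · have hs' : (0:Int) < -s := by omega
    have hstep : (a - b + -s - 1) / (-s) = (a + s - b + -s - 1) / (-s) + 1 := by
      have := Int.add_mul_ediv_right (a + s - b + -s - 1) 1 hs'.ne'
      have harg : a + s - b + -s - 1 + 1 * (-s) = a - b + -s - 1 := by ring
      rw [harg] at this
      omega
    have hnn : 0 ≤ (a + s - b + -s - 1) / (-s) := by
      apply Int.ediv_nonneg _ hs'.le
      omega
    simp only [if_pos h, if_pos h2]
    have hT : ((a - b + -s - 1) / (-s)).toNat = ((a + s - b + -s - 1) / (-s)).toNat + 1 := by omega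
    rw [hT, List.range_succ_eq_map, List.map_cons, List.map_map]
    congr 1
    · push_cast; ring
    · apply List.map_congr_left
      intro k _
      simp only [Function.comp_apply]
      push_cast [Nat.succ_eq_add_one]
      ring
  · have hs' : (0:Int) < -s := by omega
    have h1 : 1 ≤ (a - b + -s - 1) / (-s) := by
      rw [Int.le_ediv_iff_mul_le hs']; omega
    have h2' : (a - b + -s - 1) / (-s) < 2 := by
      rw [Int.ediv_lt_iff_lt_mul hs']; omega
    have hone : (a - b + -s - 1) / (-s) = 1 := by omega
    simp only [if_pos h, if_neg h2, hone]
    norm_num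

-- The ports agree on every input (the .getD defaults coincide even outside Pre_).
theorem ports_agree (nums : List Int) (x : Int) (multiplier : Int) :
    x_sum_recursion nums x multiplier = x_sum_recursion_alt nums x multiplier := by
  fun_induction x_sum_recursion nums x multiplier with
  | case1 m hx0 =>
    simp [x_sum_recursion_alt, hx0]
  | case2 m hx0 hxpos idx hin ih =>
    have hlt : m * x - 1 < ((nums.length : Int)) := hin
    rw [ih]
    simp only [x_sum_recursion_alt, if_neg hx0, if_pos hxpos]
    rw [pyRange_pos_cons (m * x - 1) ((nums.length : Int)) x hxpos hlt,
      List.map_cons, List.sum_cons]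
    have harg : m * x - 1 + x = (m + 1) * x - 1 := by ring
    rw [harg]
  | case3 m hx0 hxpos idx hout =>
    have hge : ((nums.length : Int)) ≤ m * x - 1 := by
      have h1 : ¬ (m * x - 1 < ((nums.length : Int))) := hout
      omega
    simp only [x_sum_recursion_alt, if_neg hx0, if_pos hxpos]
    rw [pyRange_pos_nil (m * x - 1) ((nums.length : Int)) x hxpos hge]
    simp
  | case4 m hx0 hxpos idx hin ih =>
    have hxneg : x < 0 := by omega
    have hin' : (((m * x).natAbs : Int)) ≤ ((nums.length : Int)) := hin
    have hsum : (m + 1) * x = m * x + x := by ring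
    have hgate : ¬ (m * x > (nums.length : Int)) := by omega
    have hgate' : ¬ ((m + 1) * x > (nums.length : Int)) := by omega
    rw [ih]
    simp only [x_sum_recursion_alt, if_neg hx0, if_neg hxpos]
    rw [if_neg hgate, if_neg hgate']
    rw [pyRange_neg_cons (m * x) (-((nums.length : Int)) - 1) x hxneg (by omega),
      List.map_cons, List.sum_cons]
    rw [← hsum]
  | case5 m hx0 hxpos idx hout =>
    have hxneg : x < 0 := by omega
    have hout' : ¬ ((((m * x).natAbs : Int)) ≤ ((nums.length : Int))) := hout
    simp only [x_sum_recursion_alt, if_neg hx0, if_neg hxpos]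
    by_cases hgate : m * x > (nums.length : Int)
    · rw [if_pos hgate]
    · rw [if_neg hgate]
      rw [pyRange_neg_nil (m * x) (-((nums.length : Int)) - 1) x hxneg (by omega)]
      simp

-- ===== VERDICT (by name: the statement is the Claim_ definition above) =====
theorem x_sum_recursion_spec : Claim_equal_x_sum_recursion := by
  intro nums x multiplier _ _
  unfold Spec_x_sum_recursion
  exact ports_agree nums x multiplier
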